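/-
  THE SEGMENTS OF `DGifCloseFile` (dgif_lib.c:683-735; 92 instructions at 109C60H … 109DC8H; NO protected frame: four pushes and
  `sub rsp, 8`; contract: Gif/Spec/Slurp.lean `DGifCloseFile.spec`; design/CONTRACTS.md entry 20; design/units/DGifCloseFile.tsv):
  the assertions at its cut points, the segment claims, and the COMPOSITION (segments ⇒ the contract), proved here.
  The form: Gif/Spec/Seg_DGifGetImageDesc.lean (an unprotected forest-level function whose heap changes).

      unit  from      to        what it walks                                                                          instructions
      1     109C60H   109CB5H   the four pushes, `sub rsp, 8`, `rbx = gif`, `rbp = ErrorCode`; the two NULL tests of l.686 (`GifFile`,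
                                `GifFile->Private`: both arms 109DB0H, 109DB8H are DEAD: gif and pv are live objects);
                                l.690-692: `gif.Image.ColorMap ≠ NULL`: GifFreeMapObject, the checked store of NULL             22
      2     109CB5H   109CDDH   l.695-697: `gif.SColorMap ≠ NULL`: GifFreeMapObject, the checked store of NULL                     9
      3     109CDDH   109D06H   l.700-702: `gif.SavedImages ≠ NULL`: GifFreeSavedImages(gif), the checked store of NULL (0 over 0:
                                GifFreeSavedImages stored it already)                                                             9
      4     109D06H   109D13H   l.705: GifFreeExtensions(&gif.ExtensionBlockCount, &gif.ExtensionBlocks), unconditionally           3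
      5     109D13H   ret       l.708-735: `Private = gif.Private`; IS_READABLE (the arm 109D7CH … 109DA3H is DEAD: `FileState = 8`);
                                `Private->File` (0: the arm 109DA3H … 109DB0H — `__asan_handle_no_return`, `fclose` — is DEAD);
                                `free(Private)`, `free(GifFile)`; `ErrorCode ≠ NULL`: the checked store `*ErrorCode = 0`;
                                `r12d = 1`; the exit 109D6EH: `eax = r12d`, `add rsp, 8`, four pops, `ret`                   30 + 2
      COMPOSITION               `compose`, proved below: `ReachVia.trans` along the five segments
  (22 + 9 + 9 + 3 + 32 = 75 instructions are walked; 17 are DEAD: 109D7CH … 109DC0H: the NOT_READABLE arm, the `fclose` arm, the two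
  NULL arms of l.686.)

  THE FRAME: four pushes (`r13 r12 rbp rbx`) and `sub rsp, 8`: `rsp = RA − 40` in the body; `rbx = gif`, `rbp = ErrorCode` from 109C73H /
  109C76H to the exit; `r14 r15` are never touched; `r12 r13` are scratch (`r13 = Private`, `r12d` = the result) inside segment 5 only.

  A CUT BEHIND EVERY NULL STORE: no pointer dangles at a cut. The heap `Hc` changes in every segment (`∃ H'` in the exits); the forest
  at a cut is FIXED by the cut: `F` with the components freed so far set to `none`:
      109CB5H   `noIcm F`     the state invariant `GifOK Hc (noIcm F)`
      109CDDH   `noMaps F`    the state invariant `GifOK Hc (noMaps F)`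
      109D06H   `noSaved F`   `CloseShape (noSaved F)` and `Owns Hc (noSaved F).owned` — NOT `Shape`: after GifFreeSavedImages
                              `gif.ImageCount` keeps its old value although `gif.SavedImages = 0` (Gif/Spec/Alloc.lean)
      109D13H   `bare F`      `CloseShape (bare F)` and `Owns Hc (bare F).owned` (gif and pv: all that is still live)
  Inside segment 5 `gif.Private` dangles after `free(Private)` (it is not read again) and gif is freed last; the post asks only the
  heap's invariant for A heap at the same place, the cursor, `rem` unchanged.
-/
import Gif.Spec.Slurp
import Gif.Spec.Alloc
import Gif.LabelsAt
namespace Gif.Spec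
open X86 X86.User Asan ProgX.Base ProgX.Base.Spec

namespace DGifCloseFile

/-! ### The forests at the cuts -/

/-- The forest after l.690-692: the image's local colour map is freed (or there was none). -/
abbrev noIcm (F : Forest) : Forest := { F with icm := none }

/-- The forest after l.695-697: both colour maps are freed. -/
abbrev noMaps (F : Forest) : Forest := { F with scm := none, icm := none }

/-- The forest after l.700-702: the saved images are freed too. -/
abbrev noSaved (F : Forest) : Forest := { F with scm := none, icm := none, saved := none }

/-- The forest after l.705: only gif and the private object are left. -/
abbrev bare (F : Forest) : Forest := { F with scm := none, icm := none, saved := none, pend := none }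

/-! ### The frame lemmas of `CloseShape` (proved here, once: segment 3 carries `CloseShape` through a store: `closeShape_frame`;
segment 4 through GifFreeExtensions, which nulls the pending list's pair: `closeShape_noPend`) -/

/-- **The memory `mem'` agrees with `mem` on everything `CloseShape F R` reads besides `gif.SavedImages`**: the pointer and count
fields of gif (`SColorMap`; `Image.ColorMap`; `ExtensionBlockCount`, `ExtensionBlocks`; `Private`), `FileState` and `File` of pv, the
cursor, the two `ColorMapObject`s, the counted blocks of the pending list. -/
structure CloseKept (F : Forest) (R : Rd) (mem mem' : Mem) : Prop where
  scmField : Mem.EqOn (F.gif + 24) (F.gif + 32) mem mem'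
  icmField : Mem.EqOn (F.gif + 64) (F.gif + 72) mem mem'
  pendFields : Mem.EqOn (F.gif + 80) (F.gif + 96) mem mem'
  privField : Mem.EqOn (F.gif + 112) (F.gif + 120) mem mem'
  state : Mem.EqOn F.pv (F.pv + 4) mem mem'
  file : Mem.EqOn (F.pv + 64) (F.pv + 72) mem mem'
  cursor : Mem.EqOn R.cur (R.cur + 16) mem mem'
  scm : ∀ o, o ∈ Map.structs F.scm → Mem.EqOn o.1 (o.1 + o.2) mem mem'
  icm : ∀ o, o ∈ Map.structs F.icm → Mem.EqOn o.1 (o.1 + o.2) mem mem'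
  pend : ∀ o, o ∈ Exts.structs F.pend → Mem.EqOn o.1 (o.1 + o.2) mem mem'

/-- **THE FRAME LEMMA OF `CloseShape`**: a memory that agrees with `mem` on what `CloseShape` reads, and in which `gif.SavedImages` is 0,
keeps it. (The bounds `< 2^64` follow from `Owns` and the heap's invariant: `Owns.inside`.) -/
theorem closeShape_frame {F : Forest} {R : Rd} {mem mem' : Mem} (h : CloseShape F R mem) (hk : CloseKept F R mem mem')
    (hsaved : GifFileType.SavedImages mem' F.gif = 0) (hg : F.gif + 120 < 2 ^ 64) (hp : F.pv + 72 < 2 ^ 64)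
    (hc : R.cur + 16 < 2 ^ 64) (hscm : ∀ x, F.scm = some x → x.obj + 24 < 2 ^ 64)
    (hicm : ∀ x, F.icm = some x → x.obj + 24 < 2 ^ 64)
    (hpend : ∀ x, F.pend = some x → x.arr + 24 * x.blocks.length < 2 ^ 64) : CloseShape F R mem' := by
  have f1 : GifFileType.SColorMap mem' F.gif = GifFileType.SColorMap mem F.gif := by
    simp only [gfield]
    exact hk.scmField.rd (F.gif + 24) 8 (by omega) (by omega) (by omega)
  have f2 : GifFileType.Image.ColorMap mem' F.gif = GifFileType.Image.ColorMap mem F.gif := by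
    simp only [gfield]
    exact hk.icmField.rd (F.gif + 64) 8 (by omega) (by omega) (by omega)
  have f3 : GifFileType.ExtensionBlockCount mem' F.gif = GifFileType.ExtensionBlockCount mem F.gif := by
    simp only [gfield]
    exact hk.pendFields.rd (F.gif + 80) 4 (by omega) (by omega) (by omega)
  have f4 : GifFileType.ExtensionBlocks mem' F.gif = GifFileType.ExtensionBlocks mem F.gif := by
    simp only [gfield]
    exact hk.pendFields.rd (F.gif + 88) 8 (by omega) (by omega) (by omega)
  have f5 : GifFileType.Private mem' F.gif = GifFileType.Private mem F.gif := by
    simp only [gfield]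
    exact hk.privField.rd (F.gif + 112) 8 (by omega) (by omega) (by omega)
  have c1 : mem_cursor.cur mem' R.cur = mem_cursor.cur mem R.cur := by
    simp only [gfield]
    exact hk.cursor.rd R.cur 8 (by omega) (by omega) (by omega)
  have c2 : mem_cursor.end mem' R.cur = mem_cursor.end mem R.cur := by
    simp only [gfield]
    exact hk.cursor.rd (R.cur + 8) 8 (by omega) (by omega) (by omega)
  refine ⟨?_, ?_, ?_, hsaved, ?_, ?_, ?_, ?_⟩
  · rw [f5]
    exact h.priv
  · rw [f1]
    exact h.scm.frame hk.scm hscm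
  · rw [f2]
    exact h.icm.frame hk.icm hicm
  · rw [f4, f3]
    exact h.pend.frame hk.pend hpend
  · simp only [gfield]
    rw [hk.file.rd (F.pv + 64) 8 (by omega) (by omega) (by omega)]
    have := h.file
    simp only [gfield] at this
    exact this
  · simp only [gfield]
    rw [hk.state.rd F.pv 4 (by omega) (by omega) (by omega)]
    have := h.state
    simp only [gfield] at this
    exact this
  · obtain ⟨k1, k2, k3⟩ := h.cursor
    refine ⟨?_, ?_, ?_⟩
    · rw [c1]
      exact k1
    · rw [c1, c2]
      exact k2
    · rw [c2]
      exact k3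

/-- **The memory `mem'` agrees with `mem` on everything `CloseShape F R` reads besides `gif.SavedImages` AND THE PENDING LIST'S PAIR**
(`gif.ExtensionBlockCount`, `gif.ExtensionBlocks`, which GifFreeExtensions overwrites in segment 4, and the list's array, which it
frees): `SColorMap`, `Image.ColorMap`, `Private` of gif, `FileState` and `File` of pv, the cursor, the two `ColorMapObject`s. -/
structure CloseKeptButPend (F : Forest) (R : Rd) (mem mem' : Mem) : Prop where
  scmField : Mem.EqOn (F.gif + 24) (F.gif + 32) mem mem'
  icmField : Mem.EqOn (F.gif + 64) (F.gif + 72) mem mem'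
  privField : Mem.EqOn (F.gif + 112) (F.gif + 120) mem mem'
  state : Mem.EqOn F.pv (F.pv + 4) mem mem'
  file : Mem.EqOn (F.pv + 64) (F.pv + 72) mem mem'
  cursor : Mem.EqOn R.cur (R.cur + 16) mem mem'
  scm : ∀ o, o ∈ Map.structs F.scm → Mem.EqOn o.1 (o.1 + o.2) mem mem'
  icm : ∀ o, o ∈ Map.structs F.icm → Mem.EqOn o.1 (o.1 + o.2) mem mem'

/-- **`CloseShape` WITHOUT THE PENDING LIST** (segment 4: `closeShape_frame` does not apply there, the pair of cells IS written): a
memory that agrees with `mem` on what `CloseShape` reads besides the pending list's pair, and in which `gif.SavedImages`,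
`gif.ExtensionBlocks` and `gif.ExtensionBlockCount` are 0 (the two clauses of GifFreeExtensions' post), has the shape of the forest
without the list. -/
theorem closeShape_noPend {F : Forest} {R : Rd} {mem mem' : Mem} (h : CloseShape F R mem) (hk : CloseKeptButPend F R mem mem')
    (hsaved : GifFileType.SavedImages mem' F.gif = 0) (hblocks : GifFileType.ExtensionBlocks mem' F.gif = 0)
    (hcount : GifFileType.ExtensionBlockCount mem' F.gif = 0) (hg : F.gif + 120 < 2 ^ 64) (hp : F.pv + 72 < 2 ^ 64)
    (hc : R.cur + 16 < 2 ^ 64) (hscm : ∀ x, F.scm = some x → x.obj + 24 < 2 ^ 64)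
    (hicm : ∀ x, F.icm = some x → x.obj + 24 < 2 ^ 64) : CloseShape { F with pend := none } R mem' := by
  have f1 : GifFileType.SColorMap mem' F.gif = GifFileType.SColorMap mem F.gif := by
    simp only [gfield]
    exact hk.scmField.rd (F.gif + 24) 8 (by omega) (by omega) (by omega)
  have f2 : GifFileType.Image.ColorMap mem' F.gif = GifFileType.Image.ColorMap mem F.gif := by
    simp only [gfield]
    exact hk.icmField.rd (F.gif + 64) 8 (by omega) (by omega) (by omega)
  have f5 : GifFileType.Private mem' F.gif = GifFileType.Private mem F.gif := by
    simp only [gfield]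
    exact hk.privField.rd (F.gif + 112) 8 (by omega) (by omega) (by omega)
  have c1 : mem_cursor.cur mem' R.cur = mem_cursor.cur mem R.cur := by
    simp only [gfield]
    exact hk.cursor.rd R.cur 8 (by omega) (by omega) (by omega)
  have c2 : mem_cursor.end mem' R.cur = mem_cursor.end mem R.cur := by
    simp only [gfield]
    exact hk.cursor.rd (R.cur + 8) 8 (by omega) (by omega) (by omega)
  refine ⟨?_, ?_, ?_, hsaved, ?_, ?_, ?_, ?_⟩
  · show GifFileType.Private mem' F.gif = F.pv
    rw [f5]
    exact h.priv
  · show MapAt F.scm (GifFileType.SColorMap mem' F.gif) mem'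
    rw [f1]
    exact h.scm.frame hk.scm hscm
  · show MapAt F.icm (GifFileType.Image.ColorMap mem' F.gif) mem'
    rw [f2]
    exact h.icm.frame hk.icm hicm
  · show GifFileType.ExtensionBlocks mem' F.gif = 0 ∧ GifFileType.ExtensionBlockCount mem' F.gif = 0
    exact ⟨hblocks, hcount⟩
  · show GifFilePrivateType.File mem' F.pv = 0
    simp only [gfield]
    rw [hk.file.rd (F.pv + 64) 8 (by omega) (by omega) (by omega)]
    have := h.file
    simp only [gfield] at this
    exact this
  · show GifFilePrivateType.FileState mem' F.pv = 8
    simp only [gfield]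
    rw [hk.state.rd F.pv 4 (by omega) (by omega) (by omega)]
    have := h.state
    simp only [gfield] at this
    exact this
  · obtain ⟨k1, k2, k3⟩ := h.cursor
    refine ⟨?_, ?_, ?_⟩
    · rw [c1]
      exact k1
    · rw [c1, c2]
      exact k2
    · rw [c2]
      exact k3

/-- **The shape without the saved images is a `CloseShape`** (segment 3 when `gif.SavedImages = NULL`: nothing is called). -/
theorem closeShape_of_shape {F : Forest} {R : Rd} {mem : Mem} (h : Shape F R mem) (hs : F.saved = none) : CloseShape F R mem := by
  have hsv := h.saved
  rw [hs] at hsv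
  exact ⟨h.priv, h.scm, h.icm, hsv.1, h.pend, h.file, h.state, h.cursor⟩

/-! ### The assertions -/

/-- **INSIDE `DGifCloseFile`**, at the address `cut`, inside the call that was entered at the state `e` (return address `ret`) with the
function's precondition for the heap `H` and the forest `F`; `Hc` is the PRESENT heap. Four registers saved (`r13 r12 rbp rbx` in push
order), `rsp = RA − 40`, `rbx = gif`, `rbp = ErrorCode`, `r14 r15` never touched; the function has no protected frame: the active
frames are the entry's; the heap's invariant holds for `Hc`; nothing was written but the function's stack and the contract's
windows; the reader is where it was (no callee reads input). `r12 r13` are dead at every cut. -/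
structure At (cut : Word) (H : Heap) (rest : List Obj) (frames : List (Nat × FrameLayout)) (F : Forest) (R : Rd) (Hc : Heap)
    (u₀ e : State) (ret : Word) (v : State) : Prop where
  /-- the function was entered at `e` … -/
  entry : AtEntry (conv u₀) Gif.L.DGifCloseFile.entry (DGifCloseFile.spec H rest frames F R).frame ret e
  /-- … with its precondition: `Env H rest frames F R e`, `rdi = F.gif`, `ErrPtr … rsi` -/
  pre : (DGifCloseFile.spec H rest frames F R).pre e
  rip : v.rip = cut
  /-- four pushes and `sub rsp, 8` below the return address -/
  rsp : v.reg .rsp = e.reg .rsp - 40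
  /-- `mov rbx, rdi` (109C73H): gif -/
  rbx : v.reg .rbx = e.reg .rdi
  /-- `mov rbp, rsi` (109C76H): `ErrorCode` -/
  rbp : v.reg .rbp = e.reg .rsi
  /-- not used by the function -/
  r14 : v.reg .r14 = e.reg .r14
  r15 : v.reg .r15 = e.reg .r15
  /-- the saved registers, in push order -/
  slot_r13 : v.mem.readLE (e.reg .rsp - 8) 8 = (e.reg .r13).toNat
  slot_r12 : v.mem.readLE (e.reg .rsp - 16) 8 = (e.reg .r12).toNat
  slot_rbp : v.mem.readLE (e.reg .rsp - 24) 8 = (e.reg .rbp).toNat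
  slot_rbx : v.mem.readLE (e.reg .rsp - 32) 8 = (e.reg .rbx).toNat
  /-- the return address is still in its slot (`ret` at 109D7BH pops it): every store so far went below `RA` (the pushes, the
  callees' frames) or into the heap's region and the shadow; `*ErrorCode` (a stack object of a CALLER's frame, at or above
  `RA + 8`) is written in segment 5 only -/
  slot_ra : UInt64.ofNat (v.mem.readLE (e.reg .rsp) 8) = ret
  /-- the heap's invariant for the PRESENT heap, the entry's frames, the clean stack ending at the present stack pointer -/
  inv : HeapInv Hc rest frames ((e.reg .rsp).toNat - 40) v.mem
  /-- the present heap is at the place of the entry's (the post's `SameRegion`; `HeapPre` of a callee: `SameRegion.heapPre`) -/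
  region : SameRegion H Hc
  /-- the reader is where it was (the post's clause) -/
  rem : rem R v.mem = rem R e.mem
  /-- nothing was written but the function's stack (the contract's 160 bytes) and the contract's windows (the heap's region and its
  shadow, `*ErrorCode`) -/
  same : Mem.SameExcept
    [⟨(e.reg .rsp).toNat - 160, (e.reg .rsp).toNat⟩,
     ⟨0x800000, 0x1000020⟩,
     ⟨(e.reg .rsi).toNat, (e.reg .rsi).toNat + 4⟩] e.mem v.mem
  code : (conv u₀).code.In v.mem
  abi : (conv u₀).inv v

/-- **THE STATE INVARIANT HOLDS, FOR WHAT IS LEFT OF THE FOREST** (cuts 109CB5H with `Fc = noIcm F`, 109CDDH with `Fc = noMaps F`): `At`,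
and `GifOK Hc Fc R v.mem`: every freed component's field holds NULL, every other object of the entry's forest is live in `Hc`
(`Owns.release` along `Forest.owned_icm` / `Forest.owned_scm`). -/
structure Ok (cut : Word) (H : Heap) (rest : List Obj) (frames : List (Nat × FrameLayout)) (F : Forest) (R : Rd) (Hc : Heap)
    (Fc : Forest) (u₀ e : State) (ret : Word) (v : State) : Prop where
  at_ : At cut H rest frames F R Hc u₀ e ret v
  ok : GifOK Hc Fc R v.mem

/-- **THE SAVED IMAGES ARE FREED** (cuts 109D06H with `Fc = noSaved F`, 109D13H with `Fc = bare F`): `At`; the shape that is left —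
`CloseShape Fc`: `gif.Private = pv`, the three freed pointer fields and `gif.SavedImages` hold 0, the pending list's pair agrees
with `Fc.pend`, `pv.File = 0`, `pv.FileState = 8`, the cursor —, NOT `Shape` (`gif.ImageCount` may hold the old count); and what is
still live: the objects of `Fc` (gif, pv, the pending list's; for `bare F`: gif and pv). -/
structure Closing (cut : Word) (H : Heap) (rest : List Obj) (frames : List (Nat × FrameLayout)) (F : Forest) (R : Rd) (Hc : Heap)
    (Fc : Forest) (u₀ e : State) (ret : Word) (v : State) : Prop where
  at_ : At cut H rest frames F R Hc u₀ e ret v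
  shape : CloseShape Fc R v.mem
  owns : Owns Hc Fc.owned

/-! ### The segment claims -/

/-- **Segment 1** (109C60H … 109CB5H, l.683-692, 22 instructions): the four pushes, `sub rsp, 8`; `test rdi, rdi ; je`: gif is a live
object (`Owns.inside`: `200040H ≤ gif`): not taken; `rbx = gif`, `rbp = ErrorCode`; the checked load of `gif.Private` (`= pv ≠ 0`:
`cmp ; je` not taken); the checked load of `gif.Image.ColorMap`: NULL (`F.icm = none`): on, with the entry's heap. Otherwise the map
`mp = F.icm`: `GifFreeMapObject(mp.obj)` (ghosts `mp.colors`, `3 · mp.count`: both objects live and different by `ok.owns`; `Colors` by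
`ok.shape.icm`), the checked store `gif.Image.ColorMap = NULL` (`Shape.set_icm` with `none`; `Owns.release` twice along
`Forest.owned_icm`): the heap is `(H.release mp.colors).release mp.obj`. `rem` is unchanged (no window written meets the cursor). -/
def Seg1 (Lay : Layout) (μ : Microarch) (u₀ : State) : Prop :=
  ∀ (H : Heap) (rest : List Obj) (frames : List (Nat × FrameLayout)) (F : Forest) (R : Rd) (e : State) (ret : Word),
    AtEntry (conv u₀) Gif.L.DGifCloseFile.entry (DGifCloseFile.spec H rest frames F R).frame ret e →
    (DGifCloseFile.spec H rest frames F R).pre e →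
    ReachVia Lay μ WayInv e (fun w =>
      ∃ (H' : Heap), Ok Gif.L.DGifCloseFile.at_109cb5 H rest frames F R H' (noIcm F) u₀ e ret w)

/-- **Segment 2** (109CB5H … 109CDDH, l.695-697, 9 instructions): the checked load of `gif.SColorMap`: NULL: on, with the same heap.
Otherwise the map `mp = F.scm`: `GifFreeMapObject(mp.obj)`, the checked store `gif.SColorMap = NULL` (`Shape.set_scm` with `none`;
`Owns.release` twice along `Forest.owned_scm`). -/
def Seg2 (Lay : Layout) (μ : Microarch) (u₀ : State) : Prop :=
  ∀ (H : Heap) (rest : List Obj) (frames : List (Nat × FrameLayout)) (F : Forest) (R : Rd) (Hc : Heap) (e : State) (ret : Word)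
    (v : State),
    Ok Gif.L.DGifCloseFile.at_109cb5 H rest frames F R Hc (noIcm F) u₀ e ret v →
    ReachVia Lay μ WayInv v (fun w =>
      ∃ (H' : Heap), Ok Gif.L.DGifCloseFile.at_109cdd H rest frames F R H' (noMaps F) u₀ e ret w)

/-- **Segment 3** (109CDDH … 109D06H, l.700-702, 9 instructions): the checked load of `gif.SavedImages`: NULL (`F.saved = none`): on, with
the same heap (`closeShape_of_shape`; `ok.owns`). Otherwise `GifFreeSavedImages(gif)` (its pre: `Env Hc rest frames (noMaps F) R`,
`saved ≠ none`; its post: the heap `Hc.releaseAll (the bases of Saved.objs F.saved)`, `CloseShape (noMaps F)` — the same clauses as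
`CloseShape (noSaved F)` —, `rem` unchanged; what is left is owned: `Owns.releaseAll` along `Forest.owned_saved`), then the checked
store `gif.SavedImages = NULL` (gif is live; `closeShape_frame` with `hsaved` = the stored value). -/
def Seg3 (Lay : Layout) (μ : Microarch) (u₀ : State) : Prop :=
  ∀ (H : Heap) (rest : List Obj) (frames : List (Nat × FrameLayout)) (F : Forest) (R : Rd) (Hc : Heap) (e : State) (ret : Word)
    (v : State),
    Ok Gif.L.DGifCloseFile.at_109cdd H rest frames F R Hc (noMaps F) u₀ e ret v →
    ReachVia Lay μ WayInv v (fun w =>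
      ∃ (H' : Heap), Closing Gif.L.DGifCloseFile.at_109d06 H rest frames F R H' (noSaved F) u₀ e ret w)

/-- **Segment 4** (109D06H … 109D13H, l.705, 3 instructions): `rsi = gif + 88`, `rdi = gif + 80`, `GifFreeExtensions` (ghosts
`e = F.pend`, the holder `(gif, 120)`; `ExtCells` from `shape.pend` and `owns`; ALSO the empty list). Its post: the heap
`Hc.releaseAll (the bases of Exts.objs F.pend)`, the two cells hold `(0, 0)`: `ExtsAt none`; every window written is one of the two
cells or meets no object of the heap (`Gap0`), and by `Returned.same` lies in the callee's stack or in the heap's region and its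
shadow: gif's other fields, pv's, the cursor are as they were (`closeShape_noPend`: `bare F` is `noSaved F` without the list; NOT
`closeShape_frame`, which asks the pair of cells unchanged). What is left: gif and pv (`Owns.releaseAll` along
`Forest.owned_pend`). -/
def Seg4 (Lay : Layout) (μ : Microarch) (u₀ : State) : Prop :=
  ∀ (H : Heap) (rest : List Obj) (frames : List (Nat × FrameLayout)) (F : Forest) (R : Rd) (Hc : Heap) (e : State) (ret : Word)
    (v : State),
    Closing Gif.L.DGifCloseFile.at_109d06 H rest frames F R Hc (noSaved F) u₀ e ret v →
    ReachVia Lay μ WayInv v (fun w =>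
      ∃ (H' : Heap), Closing Gif.L.DGifCloseFile.at_109d13 H rest frames F R H' (bare F) u₀ e ret w)

/-- **Segment 5** (109D13H … 109D7CH and 109DC0H … 109DC8H, l.708-735, 30 + 2 instructions): the checked load of `gif.Private` (`r13 = pv`),
the checked load of `pv.FileState` (8: `and r12d, 8 ; je` not taken: the NOT_READABLE arm is dead), the checked load of `pv.File` (0:
`jne` not taken: `fclose` is never called); `free(pv)` (`(pv, 24936)` live), `free(gif)` (`(gif, 120)` live in `Hc.release pv`:
another object); `test rbp, rbp`: `ErrorCode = NULL` (109DC0H): `r12d = 1`; otherwise the checked store `*ErrorCode = 0` (`ErrPtr`: 4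
bytes inside one live STACK object — live under every heap —, not the cursor), `r12d = 1`; the exit: `eax = r12d`, `add rsp, 8`,
four pops, `ret`. The post: the heap `(Hc.release pv).release gif` (`SameRegion`), its invariant raised to the caller's stack
pointer, `CursorOK` (no window written meets the cursor), `rem` unchanged. -/
def Seg5 (Lay : Layout) (μ : Microarch) (u₀ : State) : Prop :=
  ∀ (H : Heap) (rest : List Obj) (frames : List (Nat × FrameLayout)) (F : Forest) (R : Rd) (Hc : Heap) (e : State) (ret : Word)
    (v : State),
    Closing Gif.L.DGifCloseFile.at_109d13 H rest frames F R Hc (bare F) u₀ e ret v →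
    ReachVia Lay μ WayInv v (Returned (conv u₀) (DGifCloseFile.spec H rest frames F R) e ret)

/-! ### The composition -/

/-- **The composition of `DGifCloseFile`**: the five segments chain into the function's contract. -/
theorem compose {Lay : Layout} {μ : Microarch} {u₀ : State} (h1 : Seg1 Lay μ u₀) (h2 : Seg2 Lay μ u₀) (h3 : Seg3 Lay μ u₀)
    (h4 : Seg4 Lay μ u₀) (h5 : Seg5 Lay μ u₀) :
    ∀ (H : Heap) (rest : List Obj) (frames : List (Nat × FrameLayout)) (F : Forest) (R : Rd),
      Calls Lay μ WayInv (conv u₀) Gif.L.DGifCloseFile.entry (DGifCloseFile.spec H rest frames F R) := by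
  intro H rest frames F R e ret he hp
  refine (h1 H rest frames F R e ret he hp).trans ?_
  intro v1 hv1
  obtain ⟨H1, hok1⟩ := hv1
  refine (h2 H rest frames F R H1 e ret v1 hok1).trans ?_
  intro v2 hv2
  obtain ⟨H2, hok2⟩ := hv2
  refine (h3 H rest frames F R H2 e ret v2 hok2).trans ?_
  intro v3 hv3
  obtain ⟨H3, hcl3⟩ := hv3
  refine (h4 H rest frames F R H3 e ret v3 hcl3).trans ?_
  intro v4 hv4
  obtain ⟨H4, hcl4⟩ := hv4
  exact h5 H rest frames F R H4 e ret v4 hcl4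

end DGifCloseFile

end Gif.Spec
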